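-- pv_equiv track=rewrite | github.com/Halmuhammet/Matrix-Based-Decryption-Multiprocessing | multiprocessing.py | distribute_workload
-- ===== SOURCE A (Python) =====
-- def distribute_workload(L, MAX_PROCESSES):
--     # initialize distribution list that will be returned after function call
--     distribution = []
--     # case for total row numbers divided by process count is even
--     if (L % MAX_PROCESSES == 0):
--         start_row = 0
--         for row_num in range(MAX_PROCESSES):
--             # Pack each matrixData list and append it to the aggregate list
--             end_row = (start_row + L // MAX_PROCESSES)
--             distribution.append((start_row, end_row))
--             # increment start_row after the end_row because indexing start from 0
--             start_row += L // MAX_PROCESSES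
--     else:
--         # case for when the row count is less than the process count
--         if (L / MAX_PROCESSES < 1):
--             # initialize start_row to zero to get the first row
--             start_row = 0
--             for row_num in range(L):
--                 # Pack each matrixData list and append it to the aggregate list
--                 end_row = (start_row + 1)
--                 distribution.append((start_row, end_row))
--                 # increment start_row after the end_row because indexing start from 0
--                 start_row += 1
--         else:
--             # case for row numbers cannot be divided equally among processes
--
--             processes_with_equal_load = MAX_PROCESSES - (L % MAX_PROCESSES)
--             processes_with_more_load = MAX_PROCESSES - processes_with_equal_load
--
--             # initialize starting row indexes for equal and unequal loads
--             starting_row_unequal_load = 0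
--             start_row = 0
--
--             for row_num in range(processes_with_equal_load):
--                 # Pack each matrixData list and append it to the aggregate list
--                 end_row = (start_row + (L // MAX_PROCESSES))
--                 starting_row_unequal_load = end_row # the end_row index will be the start_row index for unequal load
--                 distribution.append((start_row, end_row))
--                 start_row += (L // MAX_PROCESSES)
--
--             for row_num in range(processes_with_more_load):
--                 # Pack each matrixData list and append it to the aggregate list
--                 end_row_unequal_load = (starting_row_unequal_load + (L // MAX_PROCESSES)) + 1
--                 distribution.append((starting_row_unequal_load, end_row_unequal_load))
--                 starting_row_unequal_load += (L // MAX_PROCESSES) + 1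
--
--     # return the set of sets that contains starting and ending row indices for a matrix to be processed
--     return distribution
-- ===== SOURCE B (Python) =====
-- def distribute_workload(L, MAX_PROCESSES):
--     # closed-form: each (start, end) pair is computed directly from its index by a
--     # boundary formula; no running accumulator, no per-branch index-tracking loops
--     q, r = divmod(L, MAX_PROCESSES)
--     if r == 0:
--         return [(i * q, (i + 1) * q) for i in range(MAX_PROCESSES)]
--     if L / MAX_PROCESSES < 1:
--         return [(i, i + 1) for i in range(L)]
--     e = MAX_PROCESSES - r
--     def bound(i):
--         return i * q if i <= e else e * q + (i - e) * (q + 1)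
--     return [(bound(i), bound(i + 1)) for i in range(MAX_PROCESSES)]
-- ===== Notes on version B (the rewrite author's own statement) =====
-- stated objective: simpler
-- what changed: B computes each (start, end) pair directly from its index via a closed-form boundary formula (q,r = divmod once; bound(i) piecewise-affine), replacing A's three separate accumulator-tracking loops with stateless per-index comprehensions.
import Mathlib
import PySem

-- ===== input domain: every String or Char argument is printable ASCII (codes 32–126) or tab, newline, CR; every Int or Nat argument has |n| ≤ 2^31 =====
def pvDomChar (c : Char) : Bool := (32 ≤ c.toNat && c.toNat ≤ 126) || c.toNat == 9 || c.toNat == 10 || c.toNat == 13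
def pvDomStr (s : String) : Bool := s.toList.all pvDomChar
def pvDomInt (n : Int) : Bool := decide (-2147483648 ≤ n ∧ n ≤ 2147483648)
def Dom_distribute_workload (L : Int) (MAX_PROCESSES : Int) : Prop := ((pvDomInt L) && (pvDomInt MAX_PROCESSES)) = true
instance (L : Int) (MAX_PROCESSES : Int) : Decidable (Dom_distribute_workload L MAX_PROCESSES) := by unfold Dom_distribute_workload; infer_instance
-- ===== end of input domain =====

-- B replaces A's three accumulator loops by a closed-form boundary formula evaluated per index (simpler decomposition; same cost).

-- shared helper: exact model of Python's float test 'L / MAX_PROCESSES < 1' (appears verbatim in both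
-- Pythons); exact for M ≠ 0 and |L|, |M| ≤ 2^31, since the double ratio never rounds across 1.0 there.
def pyDivLtOne (L M : Int) : Bool := if 0 < M then decide (L < M) else decide (M < L)

-- ===== PORT A =====
def distribute_workload (L : Int) (MAX_PROCESSES : Int) : List (Int × Int) :=
  if PySem.Int.mod L MAX_PROCESSES = 0 then
    -- for row_num in range(MAX_PROCESSES): append (start_row, start_row + L//M); start_row += L//M
    ((PySem.List.pyRange 0 MAX_PROCESSES 1).foldl
      (fun (st : List (Int × Int) × Int) _ =>
        (st.1 ++ [(st.2, st.2 + PySem.Int.floordiv L MAX_PROCESSES)],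
         st.2 + PySem.Int.floordiv L MAX_PROCESSES))
      ([], 0)).1
  else if pyDivLtOne L MAX_PROCESSES then
    -- for row_num in range(L): append (start_row, start_row + 1); start_row += 1
    ((PySem.List.pyRange 0 L 1).foldl
      (fun (st : List (Int × Int) × Int) _ =>
        (st.1 ++ [(st.2, st.2 + 1)], st.2 + 1))
      ([], 0)).1
  else
    let equalLoad := MAX_PROCESSES - PySem.Int.mod L MAX_PROCESSES
    let moreLoad := MAX_PROCESSES - equalLoad
    -- first loop; state = (distribution, starting_row_unequal_load, start_row)
    let st1 := (PySem.List.pyRange 0 equalLoad 1).foldl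
      (fun (st : List (Int × Int) × Int × Int) _ =>
        (st.1 ++ [(st.2.2, st.2.2 + PySem.Int.floordiv L MAX_PROCESSES)],
         st.2.2 + PySem.Int.floordiv L MAX_PROCESSES,
         st.2.2 + PySem.Int.floordiv L MAX_PROCESSES))
      ([], 0, 0)
    -- second loop; state = (distribution, starting_row_unequal_load)
    ((PySem.List.pyRange 0 moreLoad 1).foldl
      (fun (st : List (Int × Int) × Int) _ =>
        (st.1 ++ [(st.2, st.2 + (PySem.Int.floordiv L MAX_PROCESSES + 1))],
         st.2 + (PySem.Int.floordiv L MAX_PROCESSES + 1)))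
      (st1.1, st1.2.1)).1

-- ===== PORT B =====
def distribute_workload_alt (L : Int) (MAX_PROCESSES : Int) : List (Int × Int) :=
  let q := PySem.Int.floordiv L MAX_PROCESSES
  let r := PySem.Int.mod L MAX_PROCESSES
  if r = 0 then
    (PySem.List.pyRange 0 MAX_PROCESSES 1).map (fun i => (i * q, (i + 1) * q))
  else if pyDivLtOne L MAX_PROCESSES then
    (PySem.List.pyRange 0 L 1).map (fun i => (i, i + 1))
  else
    let e := MAX_PROCESSES - r
    let bound : Int → Int := fun i => if i ≤ e then i * q else e * q + (i - e) * (q + 1)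
    (PySem.List.pyRange 0 MAX_PROCESSES 1).map (fun i => (bound i, bound (i + 1)))

-- ===== PRECONDITION & SPEC =====
-- Python raises ZeroDivisionError iff MAX_PROCESSES = 0
def Pre_distribute_workload (L : Int) (MAX_PROCESSES : Int) : Prop := MAX_PROCESSES ≠ 0
instance (L : Int) (MAX_PROCESSES : Int) : Decidable (Pre_distribute_workload L MAX_PROCESSES) := by unfold Pre_distribute_workload; infer_instance
def pvWitness_distribute_workload : Int × Int := (10, 3)

def Spec_distribute_workload (L : Int) (MAX_PROCESSES : Int) (out : List (Int × Int)) : Prop := out = distribute_workload_alt L MAX_PROCESSES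
instance (L : Int) (MAX_PROCESSES : Int) (out : List (Int × Int)) : Decidable (Spec_distribute_workload L MAX_PROCESSES out) := by unfold Spec_distribute_workload; infer_instance

-- ===== CLAIM (what is proved, stated in full; the proofs are below) =====
def Claim_equal_distribute_workload : Prop := ∀ (L : Int) (MAX_PROCESSES : Int), Dom_distribute_workload L MAX_PROCESSES → Pre_distribute_workload L MAX_PROCESSES → Spec_distribute_workload L MAX_PROCESSES (distribute_workload L MAX_PROCESSES)

-- ===== LEMMAS AND PROOFS =====

/-- `n` contiguous chunks of width `c` starting at `s`. -/
def pvChunks : Nat → Int → Int → List (Int × Int)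
  | 0, _, _ => []
  | n + 1, c, s => (s, s + c) :: pvChunks n c (s + c)

lemma pvFoldPair (c : Int) (l : List Int) : ∀ (acc : List (Int × Int)) (s : Int),
    l.foldl (fun (st : List (Int × Int) × Int) _ => (st.1 ++ [(st.2, st.2 + c)], st.2 + c)) (acc, s)
      = (acc ++ pvChunks l.length c s, s + l.length * c) := by
  induction l with
  | nil => intro acc s; simp [pvChunks]
  | cons x xs ih =>
      intro acc s
      simp only [List.foldl_cons, List.length_cons, pvChunks, ih, Prod.mk.injEq]
      refine ⟨by simp, by push_cast; ring⟩

lemma pvFoldTri (c : Int) (l : List Int) : ∀ (acc : List (Int × Int)) (s : Int),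
    l.foldl (fun (st : List (Int × Int) × Int × Int) _ =>
        (st.1 ++ [(st.2.2, st.2.2 + c)], st.2.2 + c, st.2.2 + c)) (acc, s, s)
      = (acc ++ pvChunks l.length c s, s + l.length * c, s + l.length * c) := by
  induction l with
  | nil => intro acc s; simp [pvChunks]
  | cons x xs ih =>
      intro acc s
      simp only [List.foldl_cons, List.length_cons, ih, pvChunks, Prod.mk.injEq]
      refine ⟨by simp, by push_cast; ring, by push_cast; ring⟩

/-- map with a c-affine boundary function over a range of length n is `pvChunks`. -/
lemma pvMapChunks (c : Int) : ∀ (n : Nat) (a : Int) (f : Int → Int),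
    (∀ i : Int, a ≤ i → i < a + n → f (i + 1) = f i + c) →
    (PySem.List.pyRange a (a + n) 1).map (fun i => (f i, f (i + 1))) = pvChunks n c (f a) := by
  intro n
  induction n with
  | zero => intro a f _; simp [PySem.List.pyRange_one_eq_nil (by omega : a + (0:Nat) ≤ a), pvChunks]
  | succ m ih =>
      intro a f hf
      have hlt : a < a + ((m : Nat) + 1 : Nat) := by push_cast; omega
      rw [PySem.List.pyRange_one_cons hlt]
      have hstep : f (a + 1) = f a + c := hf a le_rfl (by push_cast; omega)
      have hran : a + ((m : Nat) + 1 : Nat) = (a + 1) + (m : Nat) := by push_cast; ring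
      rw [List.map_cons, hran, ih (a + 1) f (fun i h1 h2 => hf i (by omega) (by push_cast at h2 ⊢; omega))]
      simp [pvChunks, hstep]

-- ===== VERDICT (by name: the statement is the Claim_ definition above) =====
theorem distribute_workload_spec : Claim_equal_distribute_workload := by
  intro L M _ hpre
  have hM0 : M ≠ 0 := hpre
  unfold Spec_distribute_workload distribute_workload distribute_workload_alt
  set q := PySem.Int.floordiv L M with hq
  set r := PySem.Int.mod L M with hr
  by_cases h0 : r = 0
  · simp only [h0, if_true]
    by_cases hM : M ≤ 0
    · rw [PySem.List.pyRange_one_eq_nil hM]; simp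
    · have hM' : (0 : Int) + (M.toNat : Nat) = M := by omega
      rw [pvFoldPair, ← hM', pvMapChunks q M.toNat 0 (fun i => i * q) (by intro i _ _; ring)]
      simp only [PySem.List.length_pyRange_one, List.nil_append, zero_mul]
      congr 1
      omega
  · simp only [if_neg h0]
    by_cases hf : pyDivLtOne L M = true
    · simp only [hf, if_true]
      by_cases hL : L ≤ 0
      · rw [PySem.List.pyRange_one_eq_nil hL]; simp
      · have hL' : (0 : Int) + (L.toNat : Nat) = L := by omega
        rw [pvFoldPair, ← hL', pvMapChunks 1 L.toNat 0 (fun i => i) (by intro i _ _; ring)]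
        simp only [PySem.List.length_pyRange_one, List.nil_append]
        congr 1
        omega
    · simp only [hf, if_false, Bool.false_eq_true]
      have hml : M - (M - r) = r := by ring
      by_cases hM : M ≤ 0
      · have hMneg : M < 0 := lt_of_le_of_ne hM hM0
        have hrneg : M < r ∧ r ≤ 0 := PySem.Int.mod_neg_bounds L hMneg
        rw [hml, PySem.List.pyRange_one_eq_nil hM,
          PySem.List.pyRange_one_eq_nil (by omega : M - r ≤ 0),
          PySem.List.pyRange_one_eq_nil (by omega : r ≤ 0)]
        simp
      · have hMpos : 0 < M := by omega
        have hrpos : 0 < r := lt_of_le_of_ne (PySem.Int.mod_nonneg L hMpos) (Ne.symm h0)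
        have hrlt : r < M := PySem.Int.mod_lt L hMpos
        -- A's side: both folds to pvChunks
        rw [hml, pvFoldTri, pvFoldPair]
        -- B's side: split the range at e := M - r, turn each half into pvChunks
        rw [PySem.List.pyRange_one_append 0 (M - r) M (by omega) (by omega), List.map_append]
        have h1 : (PySem.List.pyRange 0 (M - r) 1).map
            (fun i => ((if i ≤ M - r then i * q else (M - r) * q + (i - (M - r)) * (q + 1)),
                       (if i + 1 ≤ M - r then (i + 1) * q else (M - r) * q + (i + 1 - (M - r)) * (q + 1))))
            = pvChunks (M - r).toNat q 0 := by
          have hm := pvMapChunks q (M - r).toNat 0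
            (fun i => if i ≤ M - r then i * q else (M - r) * q + (i - (M - r)) * (q + 1))
            (by
              intro i h1 h2
              simp only []
              rw [if_pos (by omega : i ≤ M - r), if_pos (by omega : i + 1 ≤ M - r)]
              ring)
          rw [show (0 : Int) + (((M - r).toNat : Nat) : Int) = M - r from by omega] at hm
          simp only [] at hm
          rw [if_pos (by omega : (0 : Int) ≤ M - r)] at hm
          rw [hm]
          norm_num
        have h2 : (PySem.List.pyRange (M - r) M 1).map
            (fun i => ((if i ≤ M - r then i * q else (M - r) * q + (i - (M - r)) * (q + 1)),
                       (if i + 1 ≤ M - r then (i + 1) * q else (M - r) * q + (i + 1 - (M - r)) * (q + 1))))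
            = pvChunks r.toNat (q + 1) ((M - r) * q) := by
          have hm := pvMapChunks (q + 1) r.toNat (M - r)
            (fun i => if i ≤ M - r then i * q else (M - r) * q + (i - (M - r)) * (q + 1))
            (by
              intro i h1 h2
              simp only []
              rw [if_neg (by omega : ¬ i + 1 ≤ M - r)]
              by_cases hie : i ≤ M - r
              · have hieq : i = M - r := le_antisymm hie h1
                rw [if_pos hie, hieq]; ring
              · rw [if_neg hie]; ring)
          rw [show M - r + ((r.toNat : Nat) : Int) = M from by omega] at hm
          simp only [] at hm
          rw [if_pos (le_refl (M - r))] at hm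
          exact hm
        rw [h1, h2]
        simp only [PySem.List.length_pyRange_one, List.nil_append]
        rw [show (M - r - 0).toNat = (M - r).toNat from by omega,
          show (r - 0).toNat = r.toNat from by omega,
          show (0 : Int) + (((M - r).toNat : Nat) : Int) * q = (M - r) * q from by
            rw [show (((M - r).toNat : Nat) : Int) = M - r from by omega]; ring]
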